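-- pv_equiv track=rewrite | github.com/dvigo/bonArea-HackEPS-2023 | solver.py | reconstruct_full_path
-- ===== SOURCE A (Python) =====
-- def reconstruct_full_path(tsp_route, all_pairs_shortest_paths):
--     full_path = [
--         tsp_route[0]
--     ]
--     pick_at_steps = []
--     for i in range(len(tsp_route) - 1):
--         start_point = tsp_route[i]
--         end_point = tsp_route[i + 1]
--
--         # Retrieve the path between start_point and end_point
--         path_segment = all_pairs_shortest_paths[start_point][end_point][::-1]
--
--         # Add the path segment to the full path
--         # Exclude the last point to avoid duplicates with the next segment
--         full_path.extend(path_segment)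
--         pick_at_steps.append(len(full_path) - 1)
--
--     return full_path, pick_at_steps
-- ===== SOURCE B (Python) =====
-- def reconstruct_full_path(tsp_route, all_pairs_shortest_paths):
--     # Back-to-front construction: walk the route in REVERSE appending the RAW
--     # (unreversed) segments, so one global reversal at the end replaces A's
--     # per-segment reversal; pick indices come out as total-minus-suffix-length
--     # instead of reading the growing path's length.
--     rev = []
--     picks_rev = []
--     tail = 0
--     for i in range(len(tsp_route) - 1, 0, -1):
--         seg = all_pairs_shortest_paths[tsp_route[i - 1]][tsp_route[i]]
--         picks_rev.append(tail)
--         tail += len(seg)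
--         rev.extend(seg)
--     rev.append(tsp_route[0])
--     full_path = rev[::-1]
--     pick_at_steps = [tail - t for t in reversed(picks_rev)]
--     return full_path, pick_at_steps
-- ===== Notes on version B (the rewrite author's own statement) =====
-- stated objective: alternative
-- what changed: B builds the result back-to-front: it walks the route in reverse appending RAW segments so a single global reversal at the end replaces A's per-segment reversals, and derives each pick index as total-minus-suffix-length instead of reading the growing path's length inside the loop.
import Mathlib
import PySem

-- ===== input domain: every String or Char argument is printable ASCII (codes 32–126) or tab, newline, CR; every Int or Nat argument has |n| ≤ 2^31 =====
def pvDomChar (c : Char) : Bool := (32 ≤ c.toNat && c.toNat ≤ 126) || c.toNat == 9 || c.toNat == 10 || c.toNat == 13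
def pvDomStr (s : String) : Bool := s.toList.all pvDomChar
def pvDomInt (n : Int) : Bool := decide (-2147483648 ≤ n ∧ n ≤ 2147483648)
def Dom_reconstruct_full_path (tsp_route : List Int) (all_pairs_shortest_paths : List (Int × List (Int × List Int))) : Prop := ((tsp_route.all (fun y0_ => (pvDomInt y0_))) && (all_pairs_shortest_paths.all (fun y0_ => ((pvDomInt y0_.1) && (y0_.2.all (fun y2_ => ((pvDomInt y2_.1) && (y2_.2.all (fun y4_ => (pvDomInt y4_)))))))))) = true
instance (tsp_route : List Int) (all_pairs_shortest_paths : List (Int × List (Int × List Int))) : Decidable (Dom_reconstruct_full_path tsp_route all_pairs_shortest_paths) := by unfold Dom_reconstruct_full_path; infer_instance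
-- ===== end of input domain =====

-- B builds the path BACK-TO-FRONT: it walks the route in reverse appending raw segments, does one global reversal instead of A's per-segment reversals, and gets picks as total-minus-suffix-length; alternative decomposition, same cost.


-- ===== PORT A =====
def reconstruct_full_path (tsp_route : List Int) (all_pairs_shortest_paths : List (Int × List (Int × List Int))) : List Int × List Int :=
  (PySem.List.pyRange 0 ((tsp_route.length : Int) - 1) 1).foldl
    (fun (st : List Int × List Int) i =>
      let start_point := PySem.List.pyGetD tsp_route i 0
      let end_point := PySem.List.pyGetD tsp_route (i + 1) 0
      -- apsp[start][end][::-1]; dict lookups never fail under Pre_ (getD default unreachable there); [::-1] via slice? with step -1 (never none)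
      let path_segment := (PySem.List.slice?
        (((PySem.Dict.mk (PySem.Dict.mk all_pairs_shortest_paths |>.get? start_point |>.getD [])).get? end_point).getD [])
        none none (-1)).getD []
      let full_path := st.1 ++ path_segment
      (full_path, st.2 ++ [(full_path.length : Int) - 1]))
    ([PySem.List.pyGetD tsp_route 0 0], [])

-- ===== PORT B =====
def reconstruct_full_path_alt (tsp_route : List Int) (all_pairs_shortest_paths : List (Int × List (Int × List Int))) : List Int × List Int :=
  -- for i in range(len-1, 0, -1): append tail to picks_rev, add len(seg) to tail, extend rev with the RAW segment
  let st := (PySem.List.pyRange ((tsp_route.length : Int) - 1) 0 (-1)).foldl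
    (fun (st : List Int × Int × List Int) i =>
      let seg := ((PySem.Dict.mk ((PySem.Dict.mk all_pairs_shortest_paths).get? (PySem.List.pyGetD tsp_route (i - 1) 0) |>.getD [])).get?
          (PySem.List.pyGetD tsp_route i 0)).getD []
      (st.1 ++ seg, (st.2.1 + (seg.length : Int), st.2.2 ++ [st.2.1])))
    (([] : List Int), ((0 : Int), ([] : List Int)))
  let rev := st.1 ++ [PySem.List.pyGetD tsp_route 0 0]
  -- full_path = rev[::-1]; pick_at_steps = [tail - t for t in reversed(picks_rev)]
  ((PySem.List.slice? rev none none (-1)).getD [], (st.2.2.reverse).map (fun t => st.2.1 - t))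

-- ===== PRECONDITION & SPEC =====
-- Pre_ excludes exactly the inputs where the Python A raises: an empty route (IndexError on tsp_route[0])
-- and routes whose consecutive pair is missing from the nested dict (KeyError).
def Pre_reconstruct_full_path (tsp_route : List Int) (all_pairs_shortest_paths : List (Int × List (Int × List Int))) : Prop :=
  tsp_route ≠ [] ∧ ∀ i ∈ List.range (tsp_route.length - 1),
    (((PySem.Dict.mk all_pairs_shortest_paths).get? (tsp_route.getD i 0)).bind
      (fun row => (PySem.Dict.mk row).get? (tsp_route.getD (i + 1) 0))).isSome = true
instance (tsp_route : List Int) (all_pairs_shortest_paths : List (Int × List (Int × List Int))) : Decidable (Pre_reconstruct_full_path tsp_route all_pairs_shortest_paths) := by unfold Pre_reconstruct_full_path; infer_instance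

def pvWitness_reconstruct_full_path : List Int × (List (Int × List (Int × List Int))) :=
  ([0, 1], [(0, [(1, [1, 0])])])

def Spec_reconstruct_full_path (tsp_route : List Int) (all_pairs_shortest_paths : List (Int × List (Int × List Int))) (out : List Int × List Int) : Prop := out = reconstruct_full_path_alt tsp_route all_pairs_shortest_paths
instance (tsp_route : List Int) (all_pairs_shortest_paths : List (Int × List (Int × List Int))) (out : List Int × List Int) : Decidable (Spec_reconstruct_full_path tsp_route all_pairs_shortest_paths out) := by unfold Spec_reconstruct_full_path; infer_instance

-- ===== CLAIM (what is proved, stated in full; the proofs are below) =====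
def Claim_equal_reconstruct_full_path : Prop := ∀ (tsp_route : List Int) (all_pairs_shortest_paths : List (Int × List (Int × List Int))), Dom_reconstruct_full_path tsp_route all_pairs_shortest_paths → Pre_reconstruct_full_path tsp_route all_pairs_shortest_paths → Spec_reconstruct_full_path tsp_route all_pairs_shortest_paths (reconstruct_full_path tsp_route all_pairs_shortest_paths)

-- ===== LEMMAS AND PROOFS =====

-- picks produced by A's loop: running prefix sums of segment lengths, offset by c
def pvPicksFrom (c : Int) : List (List Int) → List Int
  | [] => []
  | s :: t => (c + s.length) :: pvPicksFrom (c + s.length) t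

-- picks_rev produced by B's loop: the PREVIOUS running total before each segment
def pvPrefix (c : Int) : List (List Int) → List Int
  | [] => []
  | s :: t => c :: pvPrefix (c + s.length) t

def pvSumLen (l : List (List Int)) : Int := ((l.map List.length).sum : Nat)

lemma foldA_char (g : Int → List Int) (idxs : List Int) (fp ps : List Int) :
    idxs.foldl (fun (st : List Int × List Int) i =>
        (st.1 ++ g i, st.2 ++ [((st.1 ++ g i).length : Int) - 1])) (fp, ps)
      = (fp ++ (idxs.map g).flatMap id, ps ++ pvPicksFrom ((fp.length : Int) - 1) (idxs.map g)) := by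
  induction idxs generalizing fp ps with
  | nil => simp [pvPicksFrom]
  | cons a t ih =>
      have hlen : (((fp ++ g a).length : Int)) - 1 = ((fp.length : Int) - 1) + ((g a).length : Int) := by
        push_cast [List.length_append]; ring
      simp only [List.foldl_cons, List.map_cons, List.flatMap_cons, ih, pvPicksFrom, id, hlen]
      simp [List.append_assoc]

lemma foldB_char (g : Int → List Int) (idxs : List Int) (acc1 : List Int) (c : Int) (acc2 : List Int) :
    idxs.foldl (fun (st : List Int × Int × List Int) i =>
        (st.1 ++ g i, (st.2.1 + ((g i).length : Int), st.2.2 ++ [st.2.1]))) (acc1, (c, acc2))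
      = (acc1 ++ (idxs.map g).flatMap id, (c + pvSumLen (idxs.map g), acc2 ++ pvPrefix c (idxs.map g))) := by
  induction idxs generalizing acc1 c acc2 with
  | nil => simp [pvSumLen, pvPrefix]
  | cons a t ih =>
      simp only [List.foldl_cons, List.map_cons, List.flatMap_cons, ih, pvPrefix, pvSumLen, id]
      push_cast
      simp [List.append_assoc]
      ring

-- pvPicksFrom depends only on the segment lengths, so reversing each segment changes nothing
lemma picksFrom_map_reverse (c : Int) (segs : List (List Int)) :
    pvPicksFrom c (segs.map List.reverse) = pvPicksFrom c segs := by
  induction segs generalizing c with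
  | nil => rfl
  | cons s t ih => simp [pvPicksFrom, ih]

lemma sumLen_reverse (segs : List (List Int)) : pvSumLen segs.reverse = pvSumLen segs := by
  simp [pvSumLen, List.sum_reverse]

lemma prefix_append_single (c : Int) (xs : List (List Int)) (y : List Int) :
    pvPrefix c (xs ++ [y]) = pvPrefix c xs ++ [c + pvSumLen xs] := by
  induction xs generalizing c with
  | nil => simp [pvPrefix, pvSumLen]
  | cons s t ih =>
      simp only [List.cons_append, pvPrefix, ih, pvSumLen]
      push_cast
      simp [add_assoc]

-- flattening the reversed segment list and reversing once = flattening with each segment reversed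
lemma flat_reverse (segs : List (List Int)) :
    (segs.reverse.flatten).reverse = (segs.map List.reverse).flatten := by
  induction segs with
  | nil => rfl
  | cons s t ih => simp [List.flatten_append, List.reverse_append, ih]

-- the suffix-length picks of B equal the prefix-sum picks of A
lemma picks_reverse (segs : List (List Int)) (c S : Int) :
    ((pvPrefix c segs.reverse).reverse).map (fun t => S - t)
      = pvPicksFrom (S - c - pvSumLen segs) segs := by
  induction segs generalizing c S with
  | nil => rfl
  | cons s t ih =>
      have h1 : pvPrefix c ((s :: t).reverse) = pvPrefix c t.reverse ++ [c + pvSumLen t] := by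
        simpa [sumLen_reverse] using prefix_append_single c t.reverse s
      rw [h1]
      simp only [List.reverse_append, List.reverse_cons, List.reverse_nil, List.nil_append,
        List.cons_append, List.map_cons, ih, pvPicksFrom]
      have hS : pvSumLen (s :: t) = (s.length : Int) + pvSumLen t := by
        simp [pvSumLen]
      rw [hS]
      congr 1
      · ring
      · congr 1
        ring

-- the two index→segment functions agree once the backward range is rewritten forward and shifted
lemma seg_map_shift (f : Int → Int → List Int) (tsp : List Int) :
    (PySem.List.pyRange 1 (tsp.length : Int) 1).map
        (fun i => f (PySem.List.pyGetD tsp (i - 1) 0) (PySem.List.pyGetD tsp i 0))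
      = (PySem.List.pyRange 0 ((tsp.length : Int) - 1) 1).map
        (fun i => f (PySem.List.pyGetD tsp i 0) (PySem.List.pyGetD tsp (i + 1) 0)) := by
  rw [PySem.List.pyRange_one, PySem.List.pyRange_one]
  simp only [List.map_map, sub_zero]
  apply List.map_congr_left
  intro k _
  simp only [Function.comp]
  have h1 : (1 : Int) + (k : Int) - 1 = 0 + (k : Int) := by ring
  have h2 : (1 : Int) + (k : Int) = 0 + (k : Int) + 1 := by ring
  rw [h1, h2]

-- ===== VERDICT (by name: the statement is the Claim_ definition above) =====
theorem reconstruct_full_path_spec : Claim_equal_reconstruct_full_path := by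
  intro tsp apsp _ _
  unfold Spec_reconstruct_full_path reconstruct_full_path reconstruct_full_path_alt
  rw [foldA_char (fun i =>
      (PySem.List.slice?
        (((PySem.Dict.mk (PySem.Dict.mk apsp |>.get? (PySem.List.pyGetD tsp i 0) |>.getD [])).get?
            (PySem.List.pyGetD tsp (i + 1) 0)).getD [])
        none none (-1)).getD [])]
  simp only [PySem.List.slice?_none_none_neg_one, Option.getD_some]
  have hrange : PySem.List.pyRange ((tsp.length : Int) - 1) 0 (-1)
      = (PySem.List.pyRange 1 (tsp.length : Int) 1).reverse := by
    rw [PySem.List.pyRange_neg_one_eq_reverse]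
    norm_num
  rw [hrange,
    foldB_char (fun i =>
      ((PySem.Dict.mk ((PySem.Dict.mk apsp).get? (PySem.List.pyGetD tsp (i - 1) 0) |>.getD [])).get?
          (PySem.List.pyGetD tsp i 0)).getD [])]
  have hBm : (PySem.List.pyRange 1 (tsp.length : Int) 1).reverse.map (fun i =>
        ((PySem.Dict.mk ((PySem.Dict.mk apsp).get? (PySem.List.pyGetD tsp (i - 1) 0) |>.getD [])).get?
          (PySem.List.pyGetD tsp i 0)).getD [])
      = ((PySem.List.pyRange 0 ((tsp.length : Int) - 1) 1).map (fun i =>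
        ((PySem.Dict.mk ((PySem.Dict.mk apsp).get? (PySem.List.pyGetD tsp i 0) |>.getD [])).get?
          (PySem.List.pyGetD tsp (i + 1) 0)).getD [])).reverse := by
    rw [List.map_reverse,
      seg_map_shift (fun a b => ((PySem.Dict.mk ((PySem.Dict.mk apsp).get? a |>.getD [])).get? b).getD [])]
  rw [hBm]
  have hAm : (PySem.List.pyRange 0 ((tsp.length : Int) - 1) 1).map (fun i =>
        (((PySem.Dict.mk ((PySem.Dict.mk apsp).get? (PySem.List.pyGetD tsp i 0) |>.getD [])).get?
          (PySem.List.pyGetD tsp (i + 1) 0)).getD []).reverse)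
      = ((PySem.List.pyRange 0 ((tsp.length : Int) - 1) 1).map (fun i =>
        ((PySem.Dict.mk ((PySem.Dict.mk apsp).get? (PySem.List.pyGetD tsp i 0) |>.getD [])).get?
          (PySem.List.pyGetD tsp (i + 1) 0)).getD [])).map List.reverse := by
    rw [List.map_map]
    rfl
  rw [hAm]
  generalize (PySem.List.pyRange 0 ((tsp.length : Int) - 1) 1).map (fun i =>
      ((PySem.Dict.mk ((PySem.Dict.mk apsp).get? (PySem.List.pyGetD tsp i 0) |>.getD [])).get?
        (PySem.List.pyGetD tsp (i + 1) 0)).getD []) = segs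
  refine Prod.ext ?_ ?_
  · simp only [List.nil_append, List.reverse_append, List.flatMap_id]
    simp [flat_reverse]
  · simp only [List.nil_append, zero_add]
    rw [picks_reverse segs 0 (pvSumLen segs.reverse), picksFrom_map_reverse, sumLen_reverse]
    norm_num
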